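-- pv_equiv track=rewrite | github.com/Raanelom/AoC | 2020/dag 10/dag10.py | diff_clusters
-- ===== SOURCE A (Python) =====
-- def diff_clusters(joltages_diff_list):
--     clusters = []
--     count = 0
--     for i in range(len(joltages_diff_list)):
--         if joltages_diff_list[i] == 1:
--             count += 1
--         elif count != 0:
--             count += 1  # append 1 extra, because the first element is not included in the diff list
--             clusters.append(count)
--             count = 0
--     if count != 0:
--         count += 1  # append 1 extra, because the first element is not included in the diff list
--         clusters.append(count)
--     return clusters
-- ===== SOURCE B (Python) =====
-- def diff_clusters(joltages_diff_list):
--     clusters = []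
--     i = 0
--     n = len(joltages_diff_list)
--     while i < n:
--         if joltages_diff_list[i] == 1:
--             j = i
--             while j < n and joltages_diff_list[j] == 1:
--                 j += 1
--             clusters.append(j - i + 1)
--             i = j
--         else:
--             i += 1
--     return clusters
-- ===== Notes on version B (the rewrite author's own statement) =====
-- stated objective: alternative
-- what changed: Replaces the per-element counter with end-of-run finalisation by a run-skipping scan: at each 1 it advances an inner pointer to the end of the maximal run of 1s and appends its length+1 directly, so no pending-count state or trailing finalisation exists.
import Mathlib
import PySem

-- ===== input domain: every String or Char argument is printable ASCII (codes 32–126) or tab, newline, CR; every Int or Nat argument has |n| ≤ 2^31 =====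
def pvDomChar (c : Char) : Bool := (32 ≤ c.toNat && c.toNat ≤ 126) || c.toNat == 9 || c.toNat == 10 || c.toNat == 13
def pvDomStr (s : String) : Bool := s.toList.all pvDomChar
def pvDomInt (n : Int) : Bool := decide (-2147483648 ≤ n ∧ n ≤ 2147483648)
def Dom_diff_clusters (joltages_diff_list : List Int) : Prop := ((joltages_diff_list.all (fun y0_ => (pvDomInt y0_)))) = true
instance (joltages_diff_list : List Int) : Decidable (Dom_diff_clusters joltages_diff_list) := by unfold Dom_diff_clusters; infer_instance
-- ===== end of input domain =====

-- B replaces A's per-element pending counter (finalised at run ends and after the loop)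
-- with a run-skipping scan that consumes each maximal run of 1s in one step; alternative
-- decomposition, same O(n) cost.
-- ===== PORT A =====
-- Port of A: fold carrying (clusters, count), then the trailing finalisation.
def diff_clusters (joltages_diff_list : List Int) : List Int :=
  let r := joltages_diff_list.foldl
    (fun (s : List Int × Int) x =>
      if x = 1 then (s.1, s.2 + 1)
      else if s.2 ≠ 0 then (s.1 ++ [s.2 + 1], 0)
      else s) ([], 0)
  if r.2 ≠ 0 then r.1 ++ [r.2 + 1] else r.1

-- ===== PORT B =====
-- Port of B: run-skipping scan; a run of 1s is consumed in one step via takeWhile/dropWhile.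
def diff_clusters_alt (joltages_diff_list : List Int) : List Int :=
  match joltages_diff_list with
  | [] => []
  | x :: xs =>
    if x = 1 then
      ((xs.takeWhile (· = 1)).length + 2 : Int) :: diff_clusters_alt (xs.dropWhile (· = 1))
    else diff_clusters_alt xs
termination_by joltages_diff_list.length
decreasing_by
  · exact Nat.lt_succ_of_le (List.length_dropWhile_le _ _)
  · exact Nat.lt_succ_self _

-- ===== PRECONDITION & SPEC =====
def Spec_diff_clusters (joltages_diff_list : List Int) (out : List Int) : Prop := out = diff_clusters_alt joltages_diff_list
instance (joltages_diff_list : List Int) (out : List Int) : Decidable (Spec_diff_clusters joltages_diff_list out) := by unfold Spec_diff_clusters; infer_instance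

-- ===== CLAIM (what is proved, stated in full; the proofs are below) =====
def Claim_equal_diff_clusters : Prop := ∀ (joltages_diff_list : List Int), Dom_diff_clusters joltages_diff_list → Spec_diff_clusters joltages_diff_list (diff_clusters joltages_diff_list)

-- ===== LEMMAS AND PROOFS =====

-- ===== VERDICT (by name: the statement is the Claim_ definition above) =====
theorem diff_clusters_loop (l : List Int) (cs : List Int) (c : Int) (hc : 0 ≤ c) :
    (let r := l.foldl
      (fun (s : List Int × Int) x =>
        if x = 1 then (s.1, s.2 + 1)
        else if s.2 ≠ 0 then (s.1 ++ [s.2 + 1], 0)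
        else s) (cs, c)
     if r.2 ≠ 0 then r.1 ++ [r.2 + 1] else r.1) =
    cs ++ (if c = 0 then diff_clusters_alt l
           else (c + (l.takeWhile (· = 1)).length + 1) :: diff_clusters_alt (l.dropWhile (· = 1))) := by
  induction l generalizing cs c with
  | nil =>
    simp only [List.foldl_nil, List.takeWhile_nil, List.dropWhile_nil, diff_clusters_alt]
    by_cases h : c = 0 <;> simp [h]
  | cons x xs ih =>
    by_cases hx : x = 1
    · subst hx
      have hstep : (if (1 : Int) = 1 then ((cs, c).1, (cs, c).2 + 1)
          else if (cs, c).2 ≠ 0 then ((cs, c).1 ++ [(cs, c).2 + 1], 0) else (cs, c))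
          = (cs, c + 1) := by norm_num
      rw [List.foldl_cons, hstep, ih cs (c + 1) (by omega),
        if_neg (show ¬ c + 1 = 0 by omega)]
      by_cases h : c = 0
      · subst h
        rw [if_pos rfl,
          show diff_clusters_alt (1 :: xs) =
            ((xs.takeWhile (· = 1)).length + 2 : Int) ::
              diff_clusters_alt (xs.dropWhile (· = 1)) from by
            rw [diff_clusters_alt]; simp]
        congr 2
        push_cast
        ring
      · rw [if_neg h, List.takeWhile_cons_of_pos (by simp),
          List.dropWhile_cons_of_pos (by simp)]
        congr 2
        simp only [List.length_cons]
        push_cast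
        ring
    · have haltx : diff_clusters_alt (x :: xs) = diff_clusters_alt xs := by
        rw [diff_clusters_alt]; simp [hx]
      by_cases h : c = 0
      · subst h
        have hstep : (if x = 1 then ((cs, (0 : Int)).1, (cs, (0 : Int)).2 + 1)
            else if (cs, (0 : Int)).2 ≠ 0 then ((cs, (0 : Int)).1 ++ [(cs, (0 : Int)).2 + 1], 0)
            else (cs, (0 : Int))) = (cs, (0 : Int)) := by simp [hx]
        rw [List.foldl_cons, hstep, ih cs 0 le_rfl, if_pos rfl, if_pos rfl, haltx]
      · have hstep : (if x = 1 then ((cs, c).1, (cs, c).2 + 1)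
            else if (cs, c).2 ≠ 0 then ((cs, c).1 ++ [(cs, c).2 + 1], 0) else (cs, c))
            = (cs ++ [c + 1], (0 : Int)) := by simp [hx, h]
        rw [List.foldl_cons, hstep, ih _ 0 le_rfl, if_pos rfl, if_neg h,
          List.takeWhile_cons_of_neg (by simp [hx]),
          List.dropWhile_cons_of_neg (by simp [hx]), haltx]
        simp

theorem diff_clusters_spec : Claim_equal_diff_clusters := by
  intro l _
  show diff_clusters l = diff_clusters_alt l
  have := diff_clusters_loop l [] 0 le_rfl
  simpa [diff_clusters] using this
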